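-- pv_equiv track=rewrite | github.com/deekyykeed/booklesss | _dev/scripts/md_to_deck.py | split_cards
-- ===== SOURCE A (Python) =====
-- def split_cards(md_text):
--     """
--     Split markdown into list of (heading, body_lines) tuples.
--     Splits on ## headings and *** dividers.
--     """
--     lines = md_text.split('\n')
--     cards = []
--     current_heading = None
--     current_lines = []
--
--     for line in lines:
--         if line.startswith('## '):
--             if current_heading is not None or current_lines:
--                 cards.append((current_heading, current_lines))
--             current_heading = line[3:].strip()
--             current_lines = []
--         elif line.strip() == '***':
--             cards.append((current_heading, current_lines))
--             current_heading = None
--             current_lines = []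
--         else:
--             current_lines.append(line)
--
--     if current_heading is not None or current_lines:
--         cards.append((current_heading, current_lines))
--
--     # Filter empty
--     return [(h, b) for h, b in cards if h or any(l.strip() for l in b)]
-- ===== SOURCE B (Python) =====
-- def split_cards(md_text):
--     """
--     Split markdown into list of (heading, body_lines) tuples.
--     Two-level decomposition: first partition the lines into segments at
--     '***' divider lines, then cut each segment at its '## ' headings.
--     """
--     lines = md_text.split('\n')
--
--     # Phase 1: partition into divider-separated segments (dividers dropped).
--     segs = []
--     cur = []
--     for line in lines:
--         if line.strip() == '***':
--             segs.append(cur)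
--             cur = []
--         else:
--             cur.append(line)
--     segs.append(cur)
--
--     # Phase 2: cut each segment at its headings.
--     cards = []
--     for seg in segs:
--         n = len(seg)
--         j = 0
--         while j < n and not seg[j].startswith('## '):
--             j += 1
--         cards.append((None, seg[:j]))
--         while j < n:
--             k = j + 1
--             while k < n and not seg[k].startswith('## '):
--                 k += 1
--             cards.append((seg[j][3:].strip(), seg[j + 1:k]))
--             j = k
--
--     return [(h, b) for h, b in cards if h or any(l.strip() for l in b)]
-- ===== Notes on version B (the rewrite author's own statement) =====
-- stated objective: alternative
-- what changed: Replaces A's single stateful flush-loop (current_heading/current_lines state with conditional and unconditional flushes) by a two-phase decomposition: first partition the lines into divider-separated segments, then cut each segment at its heading lines into a pre-heading card plus one card per heading, with the same final filter.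
import Mathlib
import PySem

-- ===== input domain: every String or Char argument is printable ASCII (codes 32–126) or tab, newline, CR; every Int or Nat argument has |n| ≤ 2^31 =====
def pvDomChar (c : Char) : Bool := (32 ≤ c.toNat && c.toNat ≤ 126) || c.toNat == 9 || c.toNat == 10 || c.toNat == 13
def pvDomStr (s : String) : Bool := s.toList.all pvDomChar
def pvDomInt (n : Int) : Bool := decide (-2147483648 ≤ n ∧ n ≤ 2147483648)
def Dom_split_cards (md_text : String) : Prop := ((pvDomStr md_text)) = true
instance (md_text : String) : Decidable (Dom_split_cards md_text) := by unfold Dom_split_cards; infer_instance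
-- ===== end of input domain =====

-- B replaces A's single stateful flush-loop by a two-phase decomposition (split lines
-- into '***'-separated segments, then cut each segment at its '## ' headings); same
-- return value, objective: alternative (no speed claim).


-- ===== PORT A =====
-- line.startswith('## ')
def pvIsHead (l : String) : Bool := PySem.Str.startswith l "## "
-- line.strip() == '***'
def pvIsDiv (l : String) : Bool := PySem.Str.strip l == "***"
-- line[3:].strip()
def pvHeadOf (l : String) : String := PySem.Str.strip (PySem.Str.slice l (some 3) none)
-- the filter predicate 'h or any(l.strip() for l in b)' (truthiness: None/'' falsy, a string is truthy iff nonempty)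
def pvKeep (c : Option String × List String) : Bool :=
  (match c.1 with | some s => s != "" | none => false) || c.2.any (fun l => PySem.Str.strip l != "")

-- A's for-loop: state (cards, current_heading, current_lines), branches in A's order
def pvLoopA : List String → List (Option String × List String) → Option String → List String →
    List (Option String × List String) × Option String × List String
  | [], cards, h, cur => (cards, h, cur)
  | l :: ls, cards, h, cur =>
    if pvIsHead l then
      pvLoopA ls (if h.isSome || !cur.isEmpty then cards ++ [(h, cur)] else cards) (some (pvHeadOf l)) []
    else if pvIsDiv l then
      pvLoopA ls (cards ++ [(h, cur)]) none []
    else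
      pvLoopA ls cards h (cur ++ [l])

-- the trailing 'if current_heading is not None or current_lines: cards.append(...)'
def pvFinal (r : List (Option String × List String) × Option String × List String) :
    List (Option String × List String) :=
  if r.2.1.isSome || !r.2.2.isEmpty then r.1 ++ [(r.2.1, r.2.2)] else r.1

def split_cards (md_text : String) : List (Option String × List String) :=
  -- lines = md_text.split('\n'); split? is some here since the separator "\n" is nonempty
  (pvFinal (pvLoopA ((PySem.Str.split? md_text "\n").getD []) [] none [])).filter pvKeep

-- ===== PORT B =====
-- phase 1: partition lines into segments at divider lines (state (segs, cur), trailing segs.append(cur))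
def pvSegLoop : List String → List (List String) → List String → List (List String)
  | [], segs, cur => segs ++ [cur]
  | l :: ls, segs, cur =>
    if pvIsDiv l then pvSegLoop ls (segs ++ [cur]) [] else pvSegLoop ls segs (cur ++ [l])

-- phase 2, inner scans: 'while k < n and not seg[k].startswith(...)' is the takeWhile/dropWhile
-- pair on the rest of the segment; each heading line yields one card
def pvHeadCards : List String → List (Option String × List String)
  | [] => []
  | l :: ls =>
    (some (pvHeadOf l), ls.takeWhile (fun x => !pvIsHead x)) ::
      pvHeadCards (ls.dropWhile (fun x => !pvIsHead x))
termination_by ls => ls.length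
decreasing_by
  simp only [List.length_cons]
  exact Nat.lt_succ_of_le (List.length_dropWhile_le _ _)

-- the cards of one segment: the pre-heading card, then one card per heading
def pvSegCards (seg : List String) : List (Option String × List String) :=
  (none, seg.takeWhile (fun x => !pvIsHead x)) :: pvHeadCards (seg.dropWhile (fun x => !pvIsHead x))

def split_cards_alt (md_text : String) : List (Option String × List String) :=
  ((pvSegLoop ((PySem.Str.split? md_text "\n").getD []) [] []).flatMap pvSegCards).filter pvKeep

-- ===== PRECONDITION & SPEC =====
def Spec_split_cards (md_text : String) (out : List (Option String × List String)) : Prop := out = split_cards_alt md_text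
instance (md_text : String) (out : List (Option String × List String)) : Decidable (Spec_split_cards md_text out) := by unfold Spec_split_cards; infer_instance

-- ===== CLAIM (what is proved, stated in full; the proofs are below) =====
def Claim_equal_split_cards : Prop := ∀ (md_text : String), Dom_split_cards md_text → Spec_split_cards md_text (split_cards md_text)

-- ===== LEMMAS AND PROOFS =====

-- A's conditional flush, as the list of cards it emits
def pvFlush (h : Option String) (cur : List String) : List (Option String × List String) :=
  if h.isSome || !cur.isEmpty then [(h, cur)] else []

-- the cards A's loop emits from state (h, cur) onwards (including the trailing flush)
def pvEmitA : List String → Option String → List String → List (Option String × List String)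
  | [], h, cur => pvFlush h cur
  | l :: ls, h, cur =>
    if pvIsHead l then pvFlush h cur ++ pvEmitA ls (some (pvHeadOf l)) []
    else if pvIsDiv l then (h, cur) :: pvEmitA ls none []
    else pvEmitA ls h (cur ++ [l])

-- B's segmentation, emitted from the front
def pvSegsOf : List String → List (List String)
  | [] => [[]]
  | l :: ls =>
    if pvIsDiv l then [] :: pvSegsOf ls
    else match pvSegsOf ls with
      | [] => [[l]]
      | s :: ss => (l :: s) :: ss

def pvF (ls : List String) : List (Option String × List String) := (pvSegsOf ls).flatMap pvSegCards

theorem pvLoopA_emitA (ls : List String) : ∀ cards h cur,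
    pvFinal (pvLoopA ls cards h cur) = cards ++ pvEmitA ls h cur := by
  induction ls with
  | nil =>
    intro cards h cur
    simp only [pvLoopA, pvEmitA, pvFinal, pvFlush]
    split <;> simp
  | cons l ls ih =>
    intro cards h cur
    simp only [pvLoopA, pvEmitA]
    by_cases hh : pvIsHead l
    · simp only [hh, if_true, ih]
      unfold pvFlush
      split <;> simp
    · by_cases hd : pvIsDiv l
      · simp [hh, hd, ih]
      · simp [hh, hd, ih]

theorem pvSegsOf_ne_nil (ls : List String) : pvSegsOf ls ≠ [] := by
  cases ls with
  | nil => simp [pvSegsOf]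
  | cons l ls =>
    simp only [pvSegsOf]
    split
    · simp
    · cases pvSegsOf ls <;> simp

theorem pvSegLoop_segsOf (ls : List String) : ∀ segs cur,
    pvSegLoop ls segs cur =
      segs ++ (match pvSegsOf ls with
        | [] => [cur]
        | s :: ss => (cur ++ s) :: ss) := by
  induction ls with
  | nil => intro segs cur; simp [pvSegLoop, pvSegsOf]
  | cons l ls ih =>
    intro segs cur
    simp only [pvSegLoop, pvSegsOf]
    by_cases hd : pvIsDiv l
    · simp only [hd, if_true, ih]
      cases hseq : pvSegsOf ls with
      | nil => exact absurd hseq (pvSegsOf_ne_nil ls)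
      | cons s ss => simp
    · simp only [hd, Bool.false_eq_true, if_false, ih]
      cases hseq : pvSegsOf ls with
      | nil => simp
      | cons s ss => simp

theorem pvF_shape (ls : List String) : ∃ b rest, pvF ls = (none, b) :: rest := by
  obtain ⟨s, ss, hs⟩ := List.exists_cons_of_ne_nil (pvSegsOf_ne_nil ls)
  refine ⟨s.takeWhile (fun x => !pvIsHead x),
    pvHeadCards (s.dropWhile (fun x => !pvIsHead x)) ++ ss.flatMap pvSegCards, ?_⟩
  simp [pvF, hs, pvSegCards]

-- a line starting with '## ' never strips to '***'
theorem pvHead_not_div (l : String) (h : pvIsHead l = true) : pvIsDiv l = false := by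
  rw [pvIsHead, PySem.Str.startswith_eq, PySem.Chars.startswith_iff] at h
  obtain ⟨t, ht⟩ := h
  by_contra hdiv
  rw [Bool.not_eq_false, pvIsDiv, beq_iff_eq] at hdiv
  have hl : ("***" : String).toList = PySem.Chars.strip l.toList := by
    rw [← hdiv]; exact PySem.Str.toList_strip l
  have hpre : ("## " : String).toList = ['#', '#', ' '] := by decide
  have hstar : ("***" : String).toList = ['*', '*', '*'] := by decide
  rw [hpre] at ht
  have hsp : PySem.Chars.isspace '#' = false := by decide
  have hdrop : PySem.Chars.lstrip l.toList = l.toList := by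
    rw [← ht, PySem.Chars.lstrip]
    simp [hsp]
  rw [PySem.Chars.strip, hdrop, PySem.Chars.rstrip, hstar] at hl
  have hsuf : List.dropWhile PySem.Chars.isspace l.toList.reverse <:+ l.toList.reverse :=
    List.dropWhile_suffix _
  obtain ⟨p, hp⟩ := hsuf
  have hcs : l.toList = (List.dropWhile PySem.Chars.isspace l.toList.reverse).reverse
      ++ p.reverse := by
    have h2 := congrArg List.reverse hp
    rw [List.reverse_append, List.reverse_reverse] at h2
    exact h2.symm
  rw [← hl, ← ht] at hcs
  simp at hcs

theorem pvFilter_cons_split {α : Type} (p : α → Bool) (a : α) (l : List α) :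
    List.filter p (a :: l) = List.filter p [a] ++ List.filter p l := by
  rw [← List.filter_append]; rfl

theorem pvFlush_filter (h : Option String) (cur : List String) :
    (pvFlush h cur).filter pvKeep = [(h, cur)].filter pvKeep := by
  cases h with
  | some s => simp [pvFlush]
  | none =>
    cases cur with
    | nil => decide
    | cons x xs => simp [pvFlush]

set_option maxHeartbeats 1000000 in
theorem pvMain (ls : List String) : ∀ h cur b rest, pvF ls = (none, b) :: rest →
    (pvEmitA ls h cur).filter pvKeep = ((h, cur ++ b) :: rest).filter pvKeep := by
  induction ls with
  | nil =>
    intro h cur b rest hF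
    have hn : pvF [] = [(none, ([] : List String))] := by
      simp [pvF, pvSegsOf, pvSegCards, pvHeadCards]
    rw [hn] at hF
    injection hF with h1 h2
    injection h1 with _ hb
    subst h2
    simp only [pvEmitA, ← hb, List.append_nil]
    exact pvFlush_filter h cur
  | cons l ls ih =>
    intro h cur b rest hF
    by_cases hd : pvIsDiv l
    · -- divider line
      have hh : pvIsHead l = false := by
        by_contra hc
        rw [Bool.not_eq_false] at hc
        rw [pvHead_not_div l hc] at hd
        exact absurd hd (by simp)
      have hseg : pvSegsOf (l :: ls) = [] :: pvSegsOf ls := by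
        simp only [pvSegsOf, hd, if_true]
      have hFc : pvF (l :: ls) = (none, ([] : List String)) :: pvF ls := by
        rw [pvF, hseg, List.flatMap_cons, ← pvF]
        simp [pvSegCards, pvHeadCards]
      rw [hFc] at hF
      injection hF with h1 h2
      injection h1 with _ hb
      obtain ⟨b', rest', hF'⟩ := pvF_shape ls
      simp only [pvEmitA, hh, hd, Bool.false_eq_true, if_false, if_true]
      rw [List.filter_cons, List.filter_cons, ih none [] b' rest' hF', ← hb, List.append_nil,
        ← h2, hF', List.nil_append]
    · by_cases hh : pvIsHead l
      · -- heading line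
        obtain ⟨s, ss, hs⟩ := List.exists_cons_of_ne_nil (pvSegsOf_ne_nil ls)
        have hseg : pvSegsOf (l :: ls) = (l :: s) :: ss := by
          simp only [pvSegsOf, hd, Bool.false_eq_true, if_false, hs]
        have hsc : pvSegCards (l :: s) =
            (none, ([] : List String)) ::
              (some (pvHeadOf l), s.takeWhile (fun x => !pvIsHead x)) ::
                pvHeadCards (s.dropWhile (fun x => !pvIsHead x)) := by
          simp [pvSegCards, hh, pvHeadCards]
        have hFc : pvF (l :: ls) =
            (none, ([] : List String)) ::
              (some (pvHeadOf l), s.takeWhile (fun x => !pvIsHead x)) ::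
                (pvHeadCards (s.dropWhile (fun x => !pvIsHead x)) ++ ss.flatMap pvSegCards) := by
          rw [pvF, hseg, List.flatMap_cons, hsc]
          simp
        rw [hFc] at hF
        injection hF with h1 h2
        injection h1 with _ hb
        have hFls : pvF ls = (none, s.takeWhile (fun x => !pvIsHead x)) ::
            (pvHeadCards (s.dropWhile (fun x => !pvIsHead x)) ++ ss.flatMap pvSegCards) := by
          rw [pvF, hs, List.flatMap_cons, pvSegCards]
          simp
        have hih := ih (some (pvHeadOf l)) [] _ _ hFls
        rw [List.nil_append] at hih
        simp only [pvEmitA, hh, if_true]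
        rw [List.filter_append, hih, pvFlush_filter, ← hb, List.append_nil, ← h2]
        conv_rhs => rw [pvFilter_cons_split]
      · -- ordinary line
        obtain ⟨s, ss, hs⟩ := List.exists_cons_of_ne_nil (pvSegsOf_ne_nil ls)
        have hseg : pvSegsOf (l :: ls) = (l :: s) :: ss := by
          simp only [pvSegsOf, hd, Bool.false_eq_true, if_false, hs]
        have hsc : pvSegCards (l :: s) =
            (none, l :: s.takeWhile (fun x => !pvIsHead x)) ::
              pvHeadCards (s.dropWhile (fun x => !pvIsHead x)) := by
          simp [pvSegCards, hh]
        have hFc : pvF (l :: ls) =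
            (none, l :: s.takeWhile (fun x => !pvIsHead x)) ::
              (pvHeadCards (s.dropWhile (fun x => !pvIsHead x)) ++ ss.flatMap pvSegCards) := by
          rw [pvF, hseg, List.flatMap_cons, hsc]
          simp
        rw [hFc] at hF
        injection hF with h1 h2
        injection h1 with _ hb
        have hFls : pvF ls = (none, s.takeWhile (fun x => !pvIsHead x)) ::
            (pvHeadCards (s.dropWhile (fun x => !pvIsHead x)) ++ ss.flatMap pvSegCards) := by
          rw [pvF, hs, List.flatMap_cons, pvSegCards]
          simp
        have hih := ih h (cur ++ [l]) _ _ hFls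
        simp only [pvEmitA, hh, hd, Bool.false_eq_true, if_false]
        rw [hih, ← hb, ← h2]
        simp

-- ===== VERDICT (by name: the statement is the Claim_ definition above) =====
theorem split_cards_spec : Claim_equal_split_cards := by
  intro md _
  unfold Spec_split_cards split_cards split_cards_alt
  obtain ⟨s, ss, hs⟩ := List.exists_cons_of_ne_nil
    (pvSegsOf_ne_nil ((PySem.Str.split? md "\n").getD []))
  obtain ⟨b, rest, hF⟩ := pvF_shape ((PySem.Str.split? md "\n").getD [])
  have hloop : pvSegLoop ((PySem.Str.split? md "\n").getD []) [] [] =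
      pvSegsOf ((PySem.Str.split? md "\n").getD []) := by
    rw [pvSegLoop_segsOf, hs]; simp
  have hFe : (pvSegLoop ((PySem.Str.split? md "\n").getD []) [] []).flatMap pvSegCards =
      (none, b) :: rest := by rw [hloop]; exact hF
  rw [pvLoopA_emitA, List.nil_append, pvMain _ none [] b rest hF, hFe, List.nil_append]
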